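-- pv_equiv track=rewrite | github.com/devopspatel/Python | PY_TEST/TEST/test.py | basic_looper
-- ===== SOURCE A (Python) =====
-- def basic_looper(n):
--     l = 0
--     print (f'BASIC LOOPER STARTED: {l}')
--     for i in range(n):
--         for j in range(n):
--             l += 1
--     print (f'BASIC LOOPER ENDED: {l}')
--     return l
-- ===== SOURCE B (Python) =====
-- def basic_looper(n):
--     l = max(n, 0) ** 2
--     print(f'BASIC LOOPER STARTED: 0')
--     print(f'BASIC LOOPER ENDED: {l}')
--     return l
-- ===== Notes on version B (the rewrite author's own statement) =====
-- stated objective: faster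
-- what changed: Replaced the O(n^2) nested counting loops with the closed form max(n,0)**2.
import Mathlib
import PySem

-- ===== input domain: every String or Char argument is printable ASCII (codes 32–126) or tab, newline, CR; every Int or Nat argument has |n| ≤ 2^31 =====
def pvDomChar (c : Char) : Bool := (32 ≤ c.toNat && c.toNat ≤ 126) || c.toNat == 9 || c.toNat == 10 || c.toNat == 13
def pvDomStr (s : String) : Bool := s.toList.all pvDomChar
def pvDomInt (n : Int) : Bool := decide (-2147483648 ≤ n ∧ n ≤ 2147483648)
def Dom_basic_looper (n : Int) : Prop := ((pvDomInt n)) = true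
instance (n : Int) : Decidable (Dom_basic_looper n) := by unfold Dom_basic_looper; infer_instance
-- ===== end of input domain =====

-- B replaces A's O(n^2) nested counting loops with the closed form max(n,0)**2 (asymptotically faster).
-- Equivalence is about the RETURN value only; both Pythons also print two progress lines.

-- ===== PORT A =====
def basic_looper (n : Int) : Int :=
  (PySem.List.pyRange 0 n 1).foldl (fun l _ =>
    (PySem.List.pyRange 0 n 1).foldl (fun l _ => l + 1) l) 0

-- ===== PORT B =====
def basic_looper_alt (n : Int) : Int := (max n 0) ^ 2

-- ===== PRECONDITION & SPEC =====
def Spec_basic_looper (n : Int) (out : Int) : Prop := out = basic_looper_alt n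
instance (n : Int) (out : Int) : Decidable (Spec_basic_looper n out) := by unfold Spec_basic_looper; infer_instance

-- ===== CLAIM (what is proved, stated in full; the proofs are below) =====
def Claim_equal_basic_looper : Prop := ∀ (n : Int), Dom_basic_looper n → Spec_basic_looper n (basic_looper n)

-- ===== LEMMAS AND PROOFS =====
theorem pv_foldl_add1 (xs : List Int) (l : Int) :
    xs.foldl (fun a _ => a + 1) l = l + xs.length := by
  induction xs generalizing l with
  | nil => simp
  | cons x xs ih => simp [List.foldl, ih]; ring

theorem pv_foldl_addm (xs : List Int) (m l : Int) :
    xs.foldl (fun a _ => a + m) l = l + xs.length * m := by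
  induction xs generalizing l with
  | nil => simp
  | cons x xs ih => simp [List.foldl, ih]; ring

-- ===== VERDICT (by name: the statement is the Claim_ definition above) =====
theorem basic_looper_spec : Claim_equal_basic_looper := by
  intro n _
  unfold Spec_basic_looper basic_looper basic_looper_alt
  have hinner : ∀ l : Int,
      (PySem.List.pyRange 0 n 1).foldl (fun a _ => a + 1) l
        = l + ((PySem.List.pyRange 0 n 1).length : Int) := pv_foldl_add1 _
  calc (PySem.List.pyRange 0 n 1).foldl (fun l _ =>
          (PySem.List.pyRange 0 n 1).foldl (fun l _ => l + 1) l) 0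
      = (PySem.List.pyRange 0 n 1).foldl
          (fun l _ => l + ((PySem.List.pyRange 0 n 1).length : Int)) 0 := by
        have hfun : (fun (l : Int) (_ : Int) =>
            (PySem.List.pyRange 0 n 1).foldl (fun a _ => a + 1) l)
            = (fun (l : Int) (_ : Int) => l + ((PySem.List.pyRange 0 n 1).length : Int)) := by
          funext l x; exact hinner l
        rw [hfun]
    _ = 0 + ((PySem.List.pyRange 0 n 1).length : Int) * ((PySem.List.pyRange 0 n 1).length : Int) :=
        pv_foldl_addm _ _ _
    _ = max n 0 ^ 2 := by
        rw [PySem.List.length_pyRange_one]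
        have : ((n - 0).toNat : Int) = max n 0 := by
          rw [Int.toNat_eq_max]; ring_nf
        rw [this]; ring
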